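-- pv_equiv track=rewrite | github.com/tirooosh/SScanner | client/resultWindow.py | process_url
-- ===== SOURCE A (Python) =====
-- def process_url(url):
--     if len(url) > 45:
--         new_url = ""
--         for i, char in enumerate(url):
--             new_url += char
--             if (i + 1) % 40 == 0:  # Adding 1 to ensure it doesn't insert at index 0
--                 new_url += "\n"
--         return new_url
--     return url
-- ===== SOURCE B (Python) =====
-- def process_url(url):
--     if len(url) > 45:
--         parts = []
--         i = 0
--         n = len(url)
--         while i < n:
--             chunk = url[i:i + 40]
--             parts.append(chunk + "\n" if i + 40 <= n else chunk)
--             i += 40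
--         return "".join(parts)
--     return url
-- ===== Notes on version B (the rewrite author's own statement) =====
-- stated objective: faster
-- what changed: A appends character by character testing (i+1)%40 at every index; B strides over the string in 40-character slices with a while loop, appending each full chunk plus a newline (or the short final chunk) and joining the parts once.
import Mathlib
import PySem

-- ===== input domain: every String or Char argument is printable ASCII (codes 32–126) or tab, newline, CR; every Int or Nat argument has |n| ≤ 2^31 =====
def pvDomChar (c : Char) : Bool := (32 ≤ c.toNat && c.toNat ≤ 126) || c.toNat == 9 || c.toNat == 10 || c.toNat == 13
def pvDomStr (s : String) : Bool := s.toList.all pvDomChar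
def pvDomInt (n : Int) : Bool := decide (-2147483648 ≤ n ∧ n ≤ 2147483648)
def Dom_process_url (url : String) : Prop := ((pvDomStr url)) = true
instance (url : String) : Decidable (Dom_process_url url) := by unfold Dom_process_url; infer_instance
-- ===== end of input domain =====

-- B rebuilds the string from 40-character slices instead of A's per-character loop with a mod test; equal on all inputs.

-- ===== PORT A =====
-- literal port of A: accumulate char by char over enumerate(url), inserting '\n' when (i+1) % 40 == 0
def process_url (url : String) : String :=
  if PySem.Str.len url > 45 then
    String.ofList ((PySem.List.enumerate url.toList 0).foldl
      (fun acc p => (acc ++ [p.2]) ++ (if PySem.Int.mod (p.1 + 1) 40 = 0 then ['\n'] else [])) [])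
  else url

-- ===== PORT B =====
-- the while loop of Source B: i strides by 40, each iteration appends url[i:i+40] (+'\n' when the chunk is full)
def pvAltGo (cs : List Char) (i : Nat) : List (List Char) :=
  if i < cs.length then
    (PySem.List.slice cs (some (i : Int)) (some ((i : Int) + 40)) ++
      (if i + 40 ≤ cs.length then ['\n'] else [])) :: pvAltGo cs (i + 40)
  else []
termination_by cs.length - i

def process_url_alt (url : String) : String :=
  if PySem.Str.len url > 45 then
    String.ofList (pvAltGo url.toList 0).flatten   -- "".join(parts)
  else url

-- ===== PRECONDITION & SPEC =====
def Spec_process_url (url : String) (out : String) : Prop := out = process_url_alt url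
instance (url : String) (out : String) : Decidable (Spec_process_url url out) := by unfold Spec_process_url; infer_instance

-- ===== CLAIM (what is proved, stated in full; the proofs are below) =====
def Claim_equal_process_url : Prop := ∀ (url : String), Dom_process_url url → Spec_process_url url (process_url url)

-- ===== LEMMAS AND PROOFS =====

-- canonical chunked form both loops compute
def pvChunks (cs : List Char) : List Char :=
  if cs = [] then [] else
    cs.take 40 ++ (if 40 ≤ cs.length then ['\n'] else []) ++ pvChunks (cs.drop 40)
termination_by cs.length
decreasing_by
  rename_i h
  have : cs.length ≠ 0 := fun hl => h (List.eq_nil_of_length_eq_zero hl)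
  simp [List.length_drop]; omega

lemma pvAltGo_flatten (cs : List Char) (i : Nat) :
    (pvAltGo cs i).flatten = pvChunks (cs.drop i) := by
  fun_induction pvAltGo cs i with
  | case1 i h ih =>
    have hd : cs.drop i ≠ [] := by
      intro hnil
      have := congrArg List.length hnil
      simp [List.length_drop] at this
      omega
    rw [pvChunks, if_neg hd]
    have hslice : PySem.List.slice cs (some (i : Int)) (some ((i : Int) + 40))
        = (cs.drop i).take 40 := by
      have := PySem.List.slice_natCast_add cs i 40
      simpa using this
    have hdd : (cs.drop i).drop 40 = cs.drop (i + 40) := by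
      rw [List.drop_drop]
    have hcond : (i + 40 ≤ cs.length) = (40 ≤ (cs.drop i).length) := by
      simp [List.length_drop]; omega
    simp only [List.flatten_cons, ih, hslice, hdd, hcond, List.append_assoc]
  | case2 i h =>
    have hd : cs.drop i = [] := List.drop_eq_nil_of_le (by omega)
    rw [hd, pvChunks]; simp

-- A's per-character pieces
def pvG (p : Int × Char) : List Char :=
  p.2 :: (if PySem.Int.mod (p.1 + 1) 40 = 0 then ['\n'] else [])

lemma pvMod40 (m : Nat) : (PySem.Int.mod ((m : Int)) 40 = 0) ↔ (40 ∣ m) := by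
  rw [PySem.Int.mod_eq_zero_iff_dvd]
  omega

lemma pvInBlock (ys : List Char) (k j : Nat) (hj : j + ys.length ≤ 40) :
    (PySem.List.enumerate ys ((40 * k + j : Nat) : Int)).flatMap pvG
      = ys ++ (if j + ys.length = 40 ∧ ys ≠ [] then ['\n'] else []) := by
  induction ys generalizing j with
  | nil => simp [PySem.List.enumerate_nil]
  | cons c rest ih =>
    rw [PySem.List.enumerate_cons]
    have hs1 : ((40 * k + j : Nat) : Int) + 1 = ((40 * k + (j + 1) : Nat) : Int) := by push_cast; ring
    have hmod : (PySem.Int.mod (((40 * k + (j + 1) : Nat)) : Int) 40 = 0) ↔ (j + 1 = 40) := by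
      rw [pvMod40]; omega
    have hlc : j + (rest.length + 1) ≤ 40 := by simpa using hj
    have hj' : j + 1 + rest.length ≤ 40 := by omega
    simp only [List.flatMap_cons, pvG, hs1]
    by_cases h40 : j + 1 = 40
    · have hrest : rest = [] := by
        have : rest.length = 0 := by omega
        exact List.eq_nil_of_length_eq_zero this
      subst hrest
      rw [if_pos (hmod.mpr h40), PySem.List.enumerate_nil]
      have hc : (j + [c].length = 40 ∧ (c :: ([] : List Char)) ≠ []) := ⟨by simp; omega, by simp⟩
      rw [if_pos hc]; rfl
    · rw [if_neg (fun hh => h40 (hmod.mp hh)), ih (j + 1) hj']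
      by_cases hr : rest = []
      · subst hr
        have h1 : ¬(j + 1 + ([] : List Char).length = 40 ∧ ([] : List Char) ≠ []) := by simp
        have h2 : ¬(j + (c :: ([] : List Char)).length = 40 ∧ (c :: ([] : List Char)) ≠ []) := by
          simp; omega
        rw [if_neg h1, if_neg h2]; rfl
      · have heq : (j + 1 + rest.length = 40 ∧ rest ≠ []) ↔
            (j + (c :: rest).length = 40 ∧ (c :: rest) ≠ []) := by
          simp [hr]; omega
        simp only [heq]
        simp

lemma pvEnum_chunks (n : Nat) (cs : List Char) (k : Nat) (hn : cs.length = n) :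
    (PySem.List.enumerate cs ((40 * k : Nat) : Int)).flatMap pvG = pvChunks cs := by
  induction n using Nat.strong_induction_on generalizing cs k with
  | _ n ih =>
    by_cases hnil : cs = []
    · subst hnil; rw [pvChunks]; simp [PySem.List.enumerate_nil]
    · by_cases hle : cs.length ≤ 40
      · have ht : cs.take 40 = cs := List.take_of_length_le hle
        have hd : cs.drop 40 = [] := List.drop_eq_nil_of_le hle
        have hin := pvInBlock cs k 0 (by omega)
        simp only [Nat.zero_add, Nat.add_zero] at hin
        rw [hin, pvChunks, if_neg hnil, ht, hd]
        have hnilc : pvChunks ([] : List Char) = [] := by rw [pvChunks]; simp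
        rw [hnilc, List.append_nil]
        by_cases h40 : cs.length = 40
        · rw [if_pos ⟨h40, hnil⟩, if_pos (by omega)]
        · rw [if_neg (fun hh => h40 hh.1), if_neg (by omega)]
      · have hsplit : cs = cs.take 40 ++ cs.drop 40 := (List.take_append_drop 40 cs).symm
        rw [hsplit, PySem.List.enumerate_append, List.flatMap_append]
        have hlt : (cs.take 40).length = 40 := by simp; omega
        have h1 := pvInBlock (cs.take 40) k 0 (by omega)
        simp only [Nat.add_zero, Nat.zero_add] at h1
        rw [h1, hlt]
        have hcast : ((40 * k : Nat) : Int) + (40 : Nat) = ((40 * (k + 1) : Nat) : Int) := by push_cast; ring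
        have hlen2 : (cs.drop 40).length = n - 40 := by simp [hn]
        have h2 := ih (n - 40) (by omega) (cs.drop 40) (k + 1) hlen2
        rw [hcast, h2]
        have hne : ¬(cs.take 40 ++ cs.drop 40 = []) := by rw [← hsplit]; exact hnil
        conv_rhs => rw [pvChunks, if_neg hne]
        rw [← hsplit]
        have htne : cs.take 40 ≠ [] := by
          intro hh; rw [hh] at hlt; simp at hlt
        rw [if_pos ⟨rfl, htne⟩, if_pos (by omega : 40 ≤ cs.length)]

-- ===== VERDICT (by name: the statement is the Claim_ definition above) =====
theorem process_url_spec : Claim_equal_process_url := by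
  intro url _
  unfold Spec_process_url process_url process_url_alt
  by_cases h : PySem.Str.len url > 45
  · rw [if_pos h, if_pos h]
    congr 1
    have hfold : (PySem.List.enumerate url.toList 0).foldl
        (fun acc p => (acc ++ [p.2]) ++ (if PySem.Int.mod (p.1 + 1) 40 = 0 then ['\n'] else [])) []
        = (PySem.List.enumerate url.toList 0).flatMap pvG := by
      have hfun : (fun (acc : List Char) (p : Int × Char) => (acc ++ [p.2]) ++ (if PySem.Int.mod (p.1 + 1) 40 = 0 then ['\n'] else []))
          = fun acc p => acc ++ pvG p := by
        funext acc p; simp [pvG, List.append_assoc]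
      rw [hfun, PySem.List.foldl_append_eq_flatMap]
      simp
    rw [hfold]
    have h0 : (0 : Int) = ((40 * 0 : Nat) : Int) := by norm_num
    rw [h0, pvEnum_chunks url.toList.length url.toList 0 rfl]
    rw [pvAltGo_flatten url.toList 0]
    simp
  · rw [if_neg h, if_neg h]
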